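-- pv_equiv track=rewrite | github.com/yongkingg/codetree-TILs | 240428/2개 이상의 알파벳/more-than-one-alphabet.py | isMagicText
-- ===== SOURCE A (Python) =====
-- def isMagicText(A):
--     text = list(A)
--     count = 0
--
--     for index in range(1, len(text)):
--         standard = text[0]
--         if standard != text[index]:
--             count += 1
--
--     return count
-- ===== SOURCE B (Python) =====
-- def isMagicText(A):
--     text = list(A)
--     if not text:
--         return 0
--     freq = {}
--     for ch in text:
--         freq[ch] = freq.get(ch, 0) + 1
--     first = text[0]
--     total = 0
--     for ch, n in freq.items():
--         if ch != first:
--             total += n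
--     return total
-- ===== Notes on version B (the rewrite author's own statement) =====
-- stated objective: alternative
-- what changed: Replaces the per-index mismatch-counting loop by a two-stage histogram: build a character-frequency dictionary in one pass, then sum the multiplicities of the distinct characters different from the first one.
import Mathlib
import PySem

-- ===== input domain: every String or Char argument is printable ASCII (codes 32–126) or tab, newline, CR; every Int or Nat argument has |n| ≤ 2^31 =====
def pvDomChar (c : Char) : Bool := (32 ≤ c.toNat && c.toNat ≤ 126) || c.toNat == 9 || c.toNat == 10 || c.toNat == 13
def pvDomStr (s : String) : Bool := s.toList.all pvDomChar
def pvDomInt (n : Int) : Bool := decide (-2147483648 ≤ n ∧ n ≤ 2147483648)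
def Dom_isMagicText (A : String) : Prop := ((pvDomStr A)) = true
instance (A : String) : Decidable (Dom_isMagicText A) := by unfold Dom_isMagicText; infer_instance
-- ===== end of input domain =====

-- B replaces the per-index mismatch loop by a two-stage histogram: a character-frequency
-- dictionary built in one pass, then a sum of the multiplicities of the distinct
-- characters different from the first one (objective: alternative).

-- ===== PORT A =====
def isMagicText (A : String) : Int :=
  let text := A.toList
  (PySem.List.pyRange 1 (PySem.List.len text) 1).foldl
    (fun count index =>
      let standard := PySem.List.pyGetD text 0 ' '   -- index always in range in Python (1 ≤ index < len)
      if standard != PySem.List.pyGetD text index ' ' then count + 1 else count) 0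

-- ===== PORT B =====
def isMagicText_alt (A : String) : Int :=
  match A.toList with
  | [] => 0
  | first :: rest =>
    let freq := PySem.Dict.counter (first :: rest)    -- the freq[ch] = freq.get(ch, 0) + 1 loop
    freq.items.foldl (fun total p => if p.1 != first then total + p.2 else total) 0

-- ===== PRECONDITION & SPEC =====
def Spec_isMagicText (A : String) (out : Int) : Prop := out = isMagicText_alt A
instance (A : String) (out : Int) : Decidable (Spec_isMagicText A out) := by unfold Spec_isMagicText; infer_instance

-- ===== CLAIM (what is proved, stated in full; the proofs are below) =====
def Claim_equal_isMagicText : Prop := ∀ (A : String), Dom_isMagicText A → Spec_isMagicText A (isMagicText A)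

-- ===== LEMMAS AND PROOFS =====

-- the guarded accumulating fold over pairs is the sum of the selected second components
theorem foldl_if_add_pairs (l : List (Char × Int)) (c : Char) (init : Int) :
    l.foldl (fun t p => if p.1 != c then t + p.2 else t) init
      = init + ((l.filter (fun p => p.1 != c)).map (·.2)).sum := by
  induction l generalizing init with
  | nil => simp
  | cons p l ih =>
    cases h : (p.1 != c)
    · simp only [List.foldl_cons, h, Bool.false_eq_true, if_false, List.filter_cons, ih]
    · simp only [List.foldl_cons, h, if_true, List.filter_cons, List.map_cons, List.sum_cons, ih]
      omega

-- sum over a duplicate-free list S of the multiplicities in l counts the members of S in l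
theorem sum_count_nodup (S : List Char) (l : List Char) (hS : S.Nodup) :
    (S.map (fun k => (l.count k : Int))).sum = (l.countP (fun x => decide (x ∈ S)) : Int) := by
  induction l with
  | nil => simp
  | cons x l ih =>
    rw [List.countP_cons]
    have hmap : S.map (fun k => ((x :: l).count k : Int))
        = S.map (fun k => (l.count k : Int) + if x == k then 1 else 0) := by
      apply List.map_congr_left
      intro k _
      rw [List.count_cons]
      push_cast
      rfl
    rw [hmap, PySem.List.sum_map_add_int, ih]
    have hind : (S.map (fun k => if x == k then (1 : Int) else 0)).sum
        = if x ∈ S then 1 else 0 := by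
      rw [PySem.List.sum_map_ite_one_zero]
      have hc : S.countP (fun k => x == k) = S.count x := by
        rw [List.count]
        apply List.countP_congr
        intro a _
        simp [BEq.comm]
      by_cases hx : x ∈ S
      · rw [hc, List.count_eq_one_of_mem hS hx]
        simp [hx]
      · rw [hc, List.count_eq_zero_of_not_mem hx]
        simp [hx]
    rw [hind]
    by_cases hx : x ∈ S <;> simp [hx]

-- ===== VERDICT (by name: the statement is the Claim_ definition above) =====
theorem isMagicText_spec : Claim_equal_isMagicText := by
  intro A _
  unfold Spec_isMagicText isMagicText isMagicText_alt
  simp only []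
  generalize A.toList = l
  cases l with
  | nil => rfl
  | cons h t =>
    simp only []
    -- A's loop: count the tail characters differing from the head
    rw [show PySem.List.len (h :: t) = ((h :: t).length : Int) from PySem.List.len_eq _,
        PySem.List.foldl_pyRange_pyGetD' (h :: t) ' '
          (fun count c => if (PySem.List.pyGetD (h :: t) 0 ' ') != c then count + 1 else count) 0 (a := 1) (by omega)]
    have hg : PySem.List.pyGetD (h :: t) 0 ' ' = h := by
      simp [PySem.List.pyGetD, PySem.List.pyGet?, PySem.List.pyIdx?]
    simp only [hg, Int.toNat_one, List.drop_succ_cons, List.drop_zero]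
    rw [PySem.List.foldl_count_if]
    -- B's fold over the histogram items: sum of the multiplicities of the other characters
    rw [PySem.Dict.items_counter, foldl_if_add_pairs, List.filter_map, List.map_map]
    have hfc : ((PySem.Set.ofList (h :: t)).filter
            ((fun p : Char × Int => p.1 != h) ∘ fun k => (k, ((h :: t).count k : Int)))).map
          ((fun p : Char × Int => p.2) ∘ fun k => (k, ((h :: t).count k : Int)))
        = ((PySem.Set.ofList (h :: t)).filter fun k => k != h).map
          (fun k => ((h :: t).count k : Int)) := rfl
    rw [hfc, sum_count_nodup _ _ ((PySem.Set.nodup_ofList _).filter _)]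
    have hcp : (h :: t).countP (fun x => decide (x ∈ (PySem.Set.ofList (h :: t)).filter fun k => k != h))
        = (h :: t).countP (fun x => x != h) := by
      apply List.countP_congr
      intro x hx
      simp [List.mem_filter, PySem.Set.mem_ofList, hx]
    rw [hcp, List.countP_cons]
    have hsym : t.countP (fun x => x != h) = t.countP (fun c => h != c) := by
      apply List.countP_congr
      intro x _
      simp [bne]
      exact ⟨fun a b => a b.symm, fun a b => a b.symm⟩
    simp [hsym]
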